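-- pv_equiv track=rewrite | github.com/IPU-ChenFei/ipu_icx_network_toolkit | src/collaterals/tksetup/uis/sw_panel/sw_panel.py | __gen_set_user_message_cmd
-- ===== SOURCE A (Python) =====
-- def __gen_set_user_message_cmd(user_msg):
--     """
--     generate command for get customer message command.
--     :param user_msg: customer message, format is string, length should not bigger than 128
--     :return: complete command
--     """
--     cmd = ''
--     for i in range(len(user_msg)):
--         chrtohex = hex(ord(user_msg[i]))[2:]
--         if len(chrtohex) == 1:
--             chrtohex = '0' + chrtohex
--         cmd += chrtohex
--     cmd = '550002' + cmd
--     while len(cmd) != 262: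
--         cmd += 'ff'
--     l = []
--     for i in range(len(cmd) // 2):
--         l.append(cmd[(2 * i): (2 * (i + 1))])
--     checksum = hex(sum(int(x, 16) for x in l))[-2:]
--     cmd += checksum
--     return cmd
-- ===== SOURCE B (Python) =====
-- def __gen_set_user_message_cmd(user_msg):
--     # One pass: emit two hex digits per char while accumulating a running
--     # byte total (0x57 for the '550002' prefix); pad count is computed in
--     # closed form instead of a while-loop; checksum = total mod 256.
--     total = 0x57
--     parts = ['550002']
--     for c in user_msg:
--         o = ord(c)
--         total += o
--         parts.append(format(o, '02x'))
--     pad = 128 - len(user_msg)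
--     parts.append('ff' * pad)
--     total += 0xff * pad
--     parts.append(format(total % 256, '02x'))
--     return ''.join(parts)
-- ===== Notes on version B (the rewrite author's own statement) =====
-- stated objective: simpler
-- what changed: Single pass: the checksum is accumulated as a running integer total during encoding (0x57 for the prefix, plus each ord, plus 0xff per closed-form-computed padding pair) taken mod 256, eliminating A's pad-until-262 while-loop, the pair-splitting list l and the int(x,16) re-parse pass; Pre_ excludes messages longer than 128 chars, on which A's while-loop never terminates.
import Mathlib
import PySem

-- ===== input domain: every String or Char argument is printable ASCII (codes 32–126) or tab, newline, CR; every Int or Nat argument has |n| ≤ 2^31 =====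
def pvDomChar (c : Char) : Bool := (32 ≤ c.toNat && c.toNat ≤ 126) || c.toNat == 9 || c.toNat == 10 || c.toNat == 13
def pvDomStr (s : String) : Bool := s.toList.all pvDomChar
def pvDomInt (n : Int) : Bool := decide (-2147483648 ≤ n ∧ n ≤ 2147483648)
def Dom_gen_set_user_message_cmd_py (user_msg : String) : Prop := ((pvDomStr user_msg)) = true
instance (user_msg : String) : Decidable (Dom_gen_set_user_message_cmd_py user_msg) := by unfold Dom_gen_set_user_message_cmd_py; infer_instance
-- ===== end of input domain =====

-- B folds the checksum into one accumulation pass (objective: simpler); equivalence proved on messages of length ≤ 128 (beyond that A's padding while-loop never terminates).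

-- ===== PORT A =====
-- Python's lowercase hex digit character for n < 16
def hexDig (n : Nat) : Char := if n < 10 then Char.ofNat (48 + n) else Char.ofNat (87 + n)

-- hex(n)[2:] for n ≥ 0, hand-ported step for step (exact for every Nat): lowercase hex digits of n
def hexNat (n : Nat) : List Char :=
  if _h : n < 16 then [hexDig n] else hexNat (n / 16) ++ [hexDig (n % 16)]
  termination_by n
  decreasing_by exact Nat.div_lt_self (by omega) (by omega)

-- int(x,16), hand-ported: exact on lowercase hex-digit chars '0'-'9','a'-'f' (the only chars cmd contains)
def hexVal (c : Char) : Nat := if c.toNat ≤ 57 then c.toNat - 48 else c.toNat - 87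
def intHex (s : List Char) : Nat := s.foldl (fun a c => 16 * a + hexVal c) 0

-- chrtohex = hex(ord(c))[2:]; if len == 1 prefix '0'  (A's loop body for one character)
def pvEncode (c : Char) : List Char :=
  let chrtohex := hexNat c.toNat
  if chrtohex.length = 1 then '0' :: chrtohex else chrtohex

-- while len(cmd) != 262: cmd += 'ff'   (fuel only makes the loop total; 131 steps are never exhausted under Pre_)
def padFF : Nat → List Char → List Char
  | 0, cmd => cmd
  | fuel + 1, cmd => if cmd.length = 262 then cmd else padFF fuel (cmd ++ ['f', 'f'])

def gen_set_user_message_cmd_py (user_msg : String) : String :=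
  let cs := user_msg.toList
  let cmd0 : List Char :=
    (PySem.List.pyRange 0 (PySem.List.len cs) 1).foldl
      (fun cmd i => cmd ++ pvEncode (PySem.List.pyGetD cs i ' ')) []
  let cmd1 := ['5','5','0','0','0','2'] ++ cmd0
  let cmd2 := padFF 131 cmd1
  let l : List (List Char) :=
    (PySem.List.pyRange 0 (PySem.Int.floordiv (PySem.List.len cmd2) 2) 1).foldl
      (fun l i => l ++ [PySem.List.slice cmd2 (some (2 * i)) (some (2 * (i + 1)))]) []
  let checksum := PySem.List.slice (hexNat ((l.map intHex).sum)) (some (-2)) none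
  String.mk (cmd2 ++ checksum)

-- ===== PORT B =====
-- format(n, '02x') for 0 ≤ n < 256
def hexByte (n : Nat) : List Char := [hexDig (n / 16), hexDig (n % 16)]

def gen_set_user_message_cmd_py_alt (user_msg : String) : String :=
  let cs := user_msg.toList
  let st := cs.foldl (fun (s : Int × List Char) c => (s.1 + (c.toNat : Int), s.2 ++ hexByte c.toNat))
      ((0x57 : Int), ['5','5','0','0','0','2'])
  let pad : Int := 128 - (cs.length : Int)
  let ff := (List.replicate pad.toNat ['f','f']).flatten   -- 'ff' * pad  ('' when pad ≤ 0)
  let total := st.1 + 255 * pad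
  String.mk (st.2 ++ ff ++ hexByte (PySem.Int.mod total 256).toNat)

-- ===== PRECONDITION & SPEC =====
-- Pre_ excludes messages longer than 128 characters: there A's while-loop never reaches length 262 and loops forever (A returns no value).
def Pre_gen_set_user_message_cmd_py (user_msg : String) : Prop := user_msg.toList.length ≤ 128
instance (user_msg : String) : Decidable (Pre_gen_set_user_message_cmd_py user_msg) := by unfold Pre_gen_set_user_message_cmd_py; infer_instance
def pvWitness_gen_set_user_message_cmd_py : String := "Hi"

def Spec_gen_set_user_message_cmd_py (user_msg : String) (out : String) : Prop := out = gen_set_user_message_cmd_py_alt user_msg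
instance (user_msg : String) (out : String) : Decidable (Spec_gen_set_user_message_cmd_py user_msg out) := by unfold Spec_gen_set_user_message_cmd_py; infer_instance

-- ===== CLAIM (what is proved, stated in full; the proofs are below) =====
def Claim_equal_gen_set_user_message_cmd_py : Prop := ∀ (user_msg : String), Dom_gen_set_user_message_cmd_py user_msg → Pre_gen_set_user_message_cmd_py user_msg → Spec_gen_set_user_message_cmd_py user_msg (gen_set_user_message_cmd_py user_msg)

-- ===== LEMMAS AND PROOFS =====

theorem hexNat_lt (n : Nat) (h : n < 16) : hexNat n = [hexDig n] := by
  rw [hexNat]; simp [h]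

theorem hexNat_ge (n : Nat) (h : ¬ n < 16) : hexNat n = hexNat (n / 16) ++ [hexDig (n % 16)] := by
  rw [hexNat]; simp [h]

theorem hexNat_ne_nil (n : Nat) : hexNat n ≠ [] := by
  by_cases h : n < 16
  · simp [hexNat_lt n h]
  · simp [hexNat_ge n h]

-- A's per-character encoding equals B's hexByte, for byte values < 256
theorem encodeA_eq_hexByte (c : Char) (h : c.toNat < 256) :
    pvEncode c = hexByte c.toNat := by
  unfold pvEncode
  generalize c.toNat = n at h
  by_cases h16 : n < 16
  · rw [hexNat_lt n h16]
    have h1 : n / 16 = 0 := Nat.div_eq_of_lt h16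
    have h2 : n % 16 = n := Nat.mod_eq_of_lt h16
    simp [hexByte, h1, h2, hexDig]
  · rw [hexNat_ge n h16, hexNat_lt (n / 16) (by omega)]
    simp [hexByte]

theorem hexVal_hexDig : ∀ m, m < 16 → hexVal (hexDig m) = m := by decide

theorem intHex_hexByte (n : Nat) (h : n < 256) : intHex (hexByte n) = n := by
  have h1 := hexVal_hexDig (n / 16) (by omega)
  have h2 := hexVal_hexDig (n % 16) (Nat.mod_lt _ (by omega))
  simp [intHex, hexByte, List.foldl, h1, h2]; omega

theorem length_flatMap_hexByte (bs : List Nat) :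
    (bs.flatMap hexByte).length = 2 * bs.length := by
  induction bs with
  | nil => simp
  | cons b t ih => simp [hexByte, List.flatMap_cons, ih]; omega

theorem padFF_eq (fuel : Nat) (xs : List Char)
    (hfuel : 262 ≤ xs.length + 2 * fuel) (heven : xs.length % 2 = 0) (hle : xs.length ≤ 262) :
    padFF fuel xs = xs ++ List.replicate (262 - xs.length) 'f' := by
  induction fuel generalizing xs with
  | zero =>
    have : xs.length = 262 := by omega
    simp [padFF, this]
  | succ f ih =>
    by_cases h : xs.length = 262
    · simp [padFF, h]
    · have hlt : xs.length ≤ 260 := by omega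
      have := ih (xs ++ ['f','f']) (by simp; omega) (by simp; omega) (by simp; omega)
      rw [padFF]
      simp only [h, if_false]
      rw [this]
      have : 262 - xs.length = (262 - (xs ++ ['f','f']).length) + 2 := by simp; omega
      rw [this]
      simp [List.replicate_succ]

theorem flatten_replicate_ff (k : Nat) :
    (List.replicate k ['f','f']).flatten = List.replicate (2 * k) 'f' := by
  induction k with
  | zero => simp
  | succ m ih =>
    rw [List.replicate_succ, List.flatten_cons, ih]
    have : 2 * (m + 1) = (2 * m) + 1 + 1 := by omega
    rw [this, List.replicate_succ, List.replicate_succ]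
    simp

-- the pair-splitting loop recovers the byte encoding
theorem chunks_flatMap (bs : List Nat) :
    (List.range bs.length).map (fun k => ((bs.flatMap hexByte).drop (2 * k)).take 2)
      = bs.map hexByte := by
  induction bs with
  | nil => simp
  | cons b t ih =>
    simp only [List.length_cons]
    rw [List.range_succ_eq_map]
    simp only [List.map_cons, List.map_map, List.flatMap_cons]
    refine List.cons_eq_cons.mpr ⟨by simp [hexByte], ?_⟩
    rw [← ih]
    apply List.map_congr_left
    intro k _
    simp only [Function.comp]
    have h2 : 2 * (k + 1) = (2 * k) + 1 + 1 := by omega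
    rw [h2]
    simp only [hexByte, List.cons_append, List.nil_append, List.drop_succ_cons]

-- last two hex digits of hexNat S, for 16 ≤ S
theorem hexNat_drop_last_one (m : Nat) :
    (hexNat m).drop ((hexNat m).length - 1) = [hexDig (m % 16)] := by
  induction m using Nat.strong_induction_on with
  | _ m ih =>
    by_cases h : m < 16
    · rw [hexNat_lt m h]; simp [Nat.mod_eq_of_lt h]
    · rw [hexNat_ge m h]
      have hne := hexNat_ne_nil (m / 16)
      have hlen : 1 ≤ (hexNat (m / 16)).length := List.length_pos_iff.mpr hne
      rw [List.length_append]
      simp only [List.length_singleton, Nat.add_sub_cancel]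
      rw [List.drop_append_of_le_length (by omega), List.drop_length]
      simp

theorem hexNat_last_two (S : Nat) (h : 16 ≤ S) :
    (hexNat S).drop ((hexNat S).length - 2) = [hexDig (S / 16 % 16), hexDig (S % 16)] := by
  rw [hexNat_ge S (by omega)]
  have hne := hexNat_ne_nil (S / 16)
  have hlen : 1 ≤ (hexNat (S / 16)).length := List.length_pos_iff.mpr hne
  rw [List.length_append]
  simp only [List.length_singleton]
  have h12 : (hexNat (S / 16)).length + 1 - 2 = (hexNat (S / 16)).length - 1 := by omega
  rw [h12, List.drop_append_of_le_length (by omega), hexNat_drop_last_one]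
  simp

theorem flatMap_encode (cs : List Char) (hc : ∀ c ∈ cs, c.toNat < 256) :
    cs.flatMap pvEncode = (cs.map Char.toNat).flatMap hexByte := by
  induction cs with
  | nil => rfl
  | cons c t ih =>
    simp only [List.flatMap_cons, List.map_cons]
    rw [encodeA_eq_hexByte c (hc c (by simp)), ih (fun x hx => hc x (by simp [hx]))]

theorem flatMap_replicate_255 (k : Nat) :
    (List.replicate k (255 : Nat)).flatMap hexByte = List.replicate (2 * k) 'f' := by
  have h : (List.replicate k (255 : Nat)).flatMap hexByte = (List.replicate k ['f','f']).flatten := by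
    rw [List.flatMap_def, List.map_replicate]
    rfl
  rw [h, flatten_replicate_ff]

-- ===== VERDICT (by name: the statement is the Claim_ definition above) =====
theorem gen_set_user_message_cmd_py_spec : Claim_equal_gen_set_user_message_cmd_py := by
  intro user_msg hdom hpre
  have hc : ∀ c ∈ user_msg.toList, c.toNat < 256 := by
    intro c hcmem
    have h := List.all_eq_true.mp hdom c hcmem
    simp only [pvDomChar, Bool.or_eq_true, Bool.and_eq_true, decide_eq_true_eq, beq_iff_eq] at h
    omega
  have hn : user_msg.toList.length ≤ 128 := hpre
  unfold Spec_gen_set_user_message_cmd_py gen_set_user_message_cmd_py gen_set_user_message_cmd_py_alt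
  set cs := user_msg.toList with hcs
  set n := cs.length with hnn
  set bs : List Nat := 85 :: 0 :: 2 :: (cs.map Char.toNat ++ List.replicate (128 - n) 255) with hbs
  have hb : ∀ b ∈ bs, b < 256 := by
    intro b hbm
    rw [hbs] at hbm
    simp only [List.mem_cons, List.mem_append, List.mem_map, List.mem_replicate] at hbm
    rcases hbm with h | h | h | h | h
    · omega
    · omega
    · omega
    · obtain ⟨c, hcm, rfl⟩ := h; exact hc c hcm
    · omega
  -- A side, step 1: character-encoding loop = flatMap hexByte over the byte values
  have h1 : ((PySem.List.pyRange 0 (PySem.List.len cs) 1).foldl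
      (fun cmd i => cmd ++ pvEncode (PySem.List.pyGetD cs i ' ')) []) =
      (cs.map Char.toNat).flatMap hexByte := by
    rw [PySem.List.foldl_pyRange_zero_pyGetD cs ' ' (fun cmd c => cmd ++ pvEncode c) [],
        PySem.List.foldl_append_eq_flatMap, List.nil_append, flatMap_encode cs hc]
  simp only [h1]
  -- step 2: the prefixed command is the flatMap over 85,0,2 then the message bytes
  have h2 : ['5','5','0','0','0','2'] ++ (cs.map Char.toNat).flatMap hexByte =
      (85 :: 0 :: 2 :: cs.map Char.toNat).flatMap hexByte := rfl
  rw [h2]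
  -- step 3: the padding while-loop appends (128-n) 'ff' pairs
  have hlen1 : ((85 :: 0 :: 2 :: cs.map Char.toNat).flatMap hexByte).length = 2 * n + 6 := by
    rw [length_flatMap_hexByte]
    simp [hnn]
    omega
  have h3 : padFF 131 ((85 :: 0 :: 2 :: cs.map Char.toNat).flatMap hexByte) =
      bs.flatMap hexByte := by
    rw [padFF_eq 131 _ (by omega) (by omega) (by omega), hlen1, hbs]
    have hrep : 262 - (2 * n + 6) = 2 * (128 - n) := by omega
    rw [hrep, ← flatMap_replicate_255 (128 - n)]
    simp [List.flatMap_cons, List.flatMap_append, List.append_assoc]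
  rw [h3]
  -- step 4: the pair-splitting loop recovers bs.map hexByte
  have hlen2 : (bs.flatMap hexByte).length = 2 * bs.length := length_flatMap_hexByte bs
  have hdiv : PySem.Int.floordiv (PySem.List.len (bs.flatMap hexByte)) 2 = (bs.length : Int) := by
    rw [PySem.List.len_eq, hlen2]
    have : ((2 * bs.length : Nat) : Int) = ((2 * bs.length : Nat) : Int) := rfl
    calc PySem.Int.floordiv ((2 * bs.length : Nat) : Int) 2
        = PySem.Int.floordiv ((2 * bs.length : Nat) : Int) ((2 : Nat) : Int) := by norm_num
      _ = ((2 * bs.length / 2 : Nat) : Int) := PySem.Int.floordiv_natCast _ 2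
      _ = (bs.length : Int) := by rw [Nat.mul_div_cancel_left _ (by omega)]
  have h4 : ((PySem.List.pyRange 0 (PySem.Int.floordiv (PySem.List.len (bs.flatMap hexByte)) 2) 1).foldl
      (fun l i => l ++ [PySem.List.slice (bs.flatMap hexByte) (some (2 * i)) (some (2 * (i + 1)))]) []) =
      bs.map hexByte := by
    rw [hdiv, PySem.List.foldl_append_singleton_eq_map, List.nil_append,
        PySem.List.pyRange_one, List.map_map]
    have hnt : ((bs.length : Int) - 0).toNat = bs.length := by omega
    rw [hnt, ← chunks_flatMap bs]
    apply List.map_congr_left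
    intro k hk
    simp only [Function.comp]
    have e1 : 2 * ((0 : Int) + (k : Nat)) = ((2 * k : Nat) : Int) := by push_cast; ring
    have e2 : 2 * (((0 : Int) + (k : Nat)) + 1) = ((2 * k : Nat) : Int) + ((2 : Nat) : Int) := by
      push_cast; ring
    rw [e1, e2, PySem.List.slice_natCast_add]
  rw [h4]
  -- step 5: the checksum sum is the byte sum
  have h5 : ((bs.map hexByte).map intHex).sum = bs.sum := by
    rw [List.map_map]
    have : bs.map (intHex ∘ hexByte) = bs.map id := by
      apply List.map_congr_left
      intro b hbm
      simp only [Function.comp, id]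
      exact intHex_hexByte b (hb b hbm)
    rw [this, List.map_id]
  rw [h5]
  -- step 6: S and its last two hex digits
  have hS16 : 16 ≤ bs.sum := by
    rw [hbs]; simp only [List.sum_cons]; omega
  have h6 : PySem.List.slice (hexNat bs.sum) (some (-2)) none =
      [hexDig (bs.sum / 16 % 16), hexDig (bs.sum % 16)] := by
    rw [PySem.List.slice_from_neg_ofNat (hexNat bs.sum) 2 (by omega), hexNat_last_two bs.sum hS16]
  rw [h6]
  -- B side
  have h7 : (cs.foldl (fun (s : Int × List Char) c => (s.1 + (c.toNat : Int), s.2 ++ hexByte c.toNat))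
      ((87 : Int), ['5','5','0','0','0','2'])) =
      ((87 : Int) + (cs.map (fun c => (c.toNat : Int))).sum,
        (85 :: 0 :: 2 :: cs.map Char.toNat).flatMap hexByte) := by
    rw [PySem.List.foldl_prod_mk (fun t (c : Char) => t + (c.toNat : Int))
        (fun p (c : Char) => p ++ hexByte c.toNat)]
    rw [PySem.List.foldl_add, PySem.List.foldl_append_eq_flatMap]
    rw [List.flatMap_cons, List.flatMap_cons, List.flatMap_cons, List.flatMap_map]
    rfl
  rw [h7]
  have hpadN : ((128 : Int) - (cs.length : Int)).toNat = 128 - n := by omega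
  rw [hpadN, flatten_replicate_ff]
  -- total equals the byte sum
  have h9 : (87 : Int) + (cs.map (fun c => (c.toNat : Int))).sum +
      255 * ((128 : Int) - (cs.length : Int)) = ((bs.sum : Nat) : Int) := by
    rw [hbs]
    simp only [List.sum_cons, List.sum_append]
    rw [Nat.cast_add, Nat.cast_add, Nat.cast_add, Nat.cast_add, Nat.cast_list_sum, List.map_map,
        List.sum_replicate, smul_eq_mul, Nat.cast_mul]
    have hmc : cs.map (Nat.cast ∘ Char.toNat) = cs.map (fun c => (c.toNat : Int)) := rfl
    rw [hmc]
    push_cast [Nat.cast_sub hn]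
    ring
  rw [h9]
  have h10 : (PySem.Int.mod ((bs.sum : Nat) : Int) 256).toNat = bs.sum % 256 := by
    have h := PySem.Int.mod_natCast bs.sum 256
    have h256 : ((256 : Nat) : Int) = (256 : Int) := by norm_num
    rw [h256] at h
    rw [h, Int.toNat_natCast]
  rw [h10]
  have h11 : hexByte (bs.sum % 256) = [hexDig (bs.sum / 16 % 16), hexDig (bs.sum % 16)] := by
    unfold hexByte
    have e1 : bs.sum % 256 / 16 = bs.sum / 16 % 16 := by
      have := Nat.mod_mul_right_div_self bs.sum 16 16
      norm_num at this
      exact this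
    have e2 : bs.sum % 256 % 16 = bs.sum % 16 := Nat.mod_mod_of_dvd bs.sum (by norm_num)
    rw [e1, e2]
  rw [h11]
  -- final assembly
  have hfin : bs.flatMap hexByte =
      (85 :: 0 :: 2 :: cs.map Char.toNat).flatMap hexByte ++ List.replicate (2 * (128 - n)) 'f' := by
    rw [hbs, ← flatMap_replicate_255 (128 - n)]
    simp [List.flatMap_cons, List.flatMap_append, List.append_assoc]
  rw [hfin]
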